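-- pv_equiv track=rewrite | github.com/upendra1404/projects | src/sf/tc360/scripts/python/amf_c360_attributes_mysql_pty_script.py | parseSQLOpts
-- ===== SOURCE A (Python) =====
-- def parseSQLOpts(sqlOpts):
--     mysqlAmfHostname = None
--     mysqlAmfDbname = None
--     mysqlAmfJdbcPort = None
--     mysqlAmfUserId = None
--     mysqlAmfPass = None
--     mysqlAmfScriptPath = None
--     mySQLJCEKSPath = None
--
--     for opt, arg in sqlOpts:
--
--         if(opt == "-h"):
--             mysqlAmfHostname = arg
--         elif(opt == "-d"):
--             mysqlAmfDbname = arg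
--         elif(opt == "-n"):
--             mysqlAmfJdbcPort = arg
--         elif(opt == "-u"):
--             mysqlAmfUserId = arg
--         elif (opt == "-p"):
--             mysqlAmfPass = arg
--         elif(opt == "-m"):
--             mysqlAmfScriptPath = arg
--         elif(opt == "-j"):
--             mySQLJCEKSPath = arg
--
--     sqlParams = {"mysqlAmfHostname": mysqlAmfHostname,
--                  "mysqlAmfDbname": mysqlAmfDbname,
--                  "mysqlAmfJdbcPort": mysqlAmfJdbcPort,
--                  "mysqlAmfUserId": mysqlAmfUserId,
--                  "mysqlAmfPass": mysqlAmfPass}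
--
--     sqlFiles = {"mysqlAmfScriptPath": mysqlAmfScriptPath,
--                  "mySQLJCEKSPath": mySQLJCEKSPath}
--     return sqlParams, sqlFiles
-- ===== SOURCE B (Python) =====
-- def parseSQLOpts(sqlOpts):
--     def last(flag):
--         for opt, arg in reversed(sqlOpts):
--             if opt == flag:
--                 return arg
--         return None
--
--     sqlParams = {key: last(flag) for flag, key in
--                  [("-h", "mysqlAmfHostname"),
--                   ("-d", "mysqlAmfDbname"),
--                   ("-n", "mysqlAmfJdbcPort"),
--                   ("-u", "mysqlAmfUserId"),
--                   ("-p", "mysqlAmfPass")]}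
--
--     sqlFiles = {key: last(flag) for flag, key in
--                 [("-m", "mysqlAmfScriptPath"),
--                  ("-j", "mySQLJCEKSPath")]}
--     return sqlParams, sqlFiles
-- ===== Notes on version B (the rewrite author's own statement) =====
-- stated objective: alternative
-- what changed: Replaces A's forward loop with seven mutable variables and an if/elif chain by a per-key backward search: for each target key the value is the argument of the last matching flag, found by scanning the list in reverse with an early return, and the two dicts are built directly by comprehension.
import Mathlib
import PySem

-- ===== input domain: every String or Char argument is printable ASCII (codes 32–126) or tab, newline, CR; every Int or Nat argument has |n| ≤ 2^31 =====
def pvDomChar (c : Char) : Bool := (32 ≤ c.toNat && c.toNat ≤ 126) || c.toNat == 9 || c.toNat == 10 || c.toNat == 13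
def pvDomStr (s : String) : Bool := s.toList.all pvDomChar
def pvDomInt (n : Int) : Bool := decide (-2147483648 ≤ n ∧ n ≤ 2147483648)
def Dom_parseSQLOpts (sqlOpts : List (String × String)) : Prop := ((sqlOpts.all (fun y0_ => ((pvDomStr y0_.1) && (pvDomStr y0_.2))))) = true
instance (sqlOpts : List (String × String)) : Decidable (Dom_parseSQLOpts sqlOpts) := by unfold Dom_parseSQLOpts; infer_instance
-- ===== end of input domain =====

-- B replaces A's single forward pass with seven mutable slots by a per-key backward
-- search (last matching flag wins); objective: alternative decomposition, same cost.


-- ===== PORT A =====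
-- state: (hostname, dbname, jdbcPort, userId, pass, scriptPath, jceksPath)
def pvStepA (st : Option String × Option String × Option String × Option String × Option String × Option String × Option String)
    (oa : String × String) :
    Option String × Option String × Option String × Option String × Option String × Option String × Option String :=
  let (h, d, n, u, p, m, j) := st
  let (opt, arg) := oa
  if opt == "-h" then (some arg, d, n, u, p, m, j)
  else if opt == "-d" then (h, some arg, n, u, p, m, j)
  else if opt == "-n" then (h, d, some arg, u, p, m, j)
  else if opt == "-u" then (h, d, n, some arg, p, m, j)
  else if opt == "-p" then (h, d, n, u, some arg, m, j)
  else if opt == "-m" then (h, d, n, u, p, some arg, j)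
  else if opt == "-j" then (h, d, n, u, p, m, some arg)
  else (h, d, n, u, p, m, j)

def parseSQLOpts (sqlOpts : List (String × String)) : (List (String × Option String)) × (List (String × Option String)) :=
  let s := sqlOpts.foldl pvStepA (none, none, none, none, none, none, none)
  let (h, d, n, u, p, m, j) := s
  ([("mysqlAmfHostname", h), ("mysqlAmfDbname", d), ("mysqlAmfJdbcPort", n),
    ("mysqlAmfUserId", u), ("mysqlAmfPass", p)],
   [("mysqlAmfScriptPath", m), ("mySQLJCEKSPath", j)])

-- ===== PORT B =====
-- 'last(flag)': scan the reversed list, return the first matching argument.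
def pvFindRev (flag : String) : List (String × String) → Option String
  | [] => none
  | (o, a) :: rest => if o == flag then some a else pvFindRev flag rest

def parseSQLOpts_alt (sqlOpts : List (String × String)) : (List (String × Option String)) × (List (String × Option String)) :=
  let last := fun flag => pvFindRev flag sqlOpts.reverse
  ([("mysqlAmfHostname", last "-h"), ("mysqlAmfDbname", last "-d"),
    ("mysqlAmfJdbcPort", last "-n"), ("mysqlAmfUserId", last "-u"),
    ("mysqlAmfPass", last "-p")],
   [("mysqlAmfScriptPath", last "-m"), ("mySQLJCEKSPath", last "-j")])

-- ===== PRECONDITION & SPEC =====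
def Spec_parseSQLOpts (sqlOpts : List (String × String)) (out : (List (String × Option String)) × (List (String × Option String))) : Prop := out = parseSQLOpts_alt sqlOpts
instance (sqlOpts : List (String × String)) (out : (List (String × Option String)) × (List (String × Option String))) : Decidable (Spec_parseSQLOpts sqlOpts out) := by unfold Spec_parseSQLOpts; infer_instance

-- ===== CLAIM (what is proved, stated in full; the proofs are below) =====
def Claim_equal_parseSQLOpts : Prop := ∀ (sqlOpts : List (String × String)), Dom_parseSQLOpts sqlOpts → Spec_parseSQLOpts sqlOpts (parseSQLOpts sqlOpts)

-- ===== LEMMAS AND PROOFS =====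
def pvPick (flag : String) (v : Option String) (l : List (String × String)) : Option String :=
  (pvFindRev flag l.reverse).or v

theorem pvFindRev_append (flag : String) (xs ys : List (String × String)) :
    pvFindRev flag (xs ++ ys) = (pvFindRev flag xs).or (pvFindRev flag ys) := by
  induction xs with
  | nil => simp [pvFindRev]
  | cons hd tl ih =>
    obtain ⟨o, a⟩ := hd
    by_cases h : o == flag <;> simp [pvFindRev, h, ih, Option.or]

theorem pvPick_cons (flag : String) (v : Option String) (o a : String) (t : List (String × String)) :
    pvPick flag v ((o, a) :: t) = pvPick flag (if o == flag then some a else v) t := by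
  unfold pvPick
  rw [List.reverse_cons, pvFindRev_append, Option.or_assoc]
  by_cases h : o == flag <;> simp [pvFindRev, h, Option.or]

theorem pvFold_eq_pick (l : List (String × String))
    (h d n u p m j : Option String) :
    l.foldl pvStepA (h, d, n, u, p, m, j) =
      (pvPick "-h" h l, pvPick "-d" d l, pvPick "-n" n l, pvPick "-u" u l,
       pvPick "-p" p l, pvPick "-m" m l, pvPick "-j" j l) := by
  induction l generalizing h d n u p m j with
  | nil => simp [pvPick, pvFindRev, Option.or]
  | cons hd tl ih =>
    obtain ⟨o, a⟩ := hd
    rw [List.foldl_cons]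
    show tl.foldl pvStepA (pvStepA (h, d, n, u, p, m, j) (o, a)) = _
    rw [pvStepA]
    simp only [pvPick_cons]
    by_cases h1 : o == "-h"
    · have : (o == "-d") = false ∧ (o == "-n") = false ∧ (o == "-u") = false ∧
        (o == "-p") = false ∧ (o == "-m") = false ∧ (o == "-j") = false := by
        rw [eq_of_beq h1]; exact ⟨rfl, rfl, rfl, rfl, rfl, rfl⟩
      simp [h1, this.1, this.2.1, this.2.2.1, this.2.2.2.1, this.2.2.2.2.1, this.2.2.2.2.2, ih]
    · by_cases h2 : o == "-d"
      · have : (o == "-n") = false ∧ (o == "-u") = false ∧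
          (o == "-p") = false ∧ (o == "-m") = false ∧ (o == "-j") = false := by
          rw [eq_of_beq h2]; exact ⟨rfl, rfl, rfl, rfl, rfl⟩
        simp [h1, h2, this.1, this.2.1, this.2.2.1, this.2.2.2.1, this.2.2.2.2, ih]
      · by_cases h3 : o == "-n"
        · have : (o == "-u") = false ∧ (o == "-p") = false ∧ (o == "-m") = false ∧ (o == "-j") = false := by
            rw [eq_of_beq h3]; exact ⟨rfl, rfl, rfl, rfl⟩
          simp [h1, h2, h3, this.1, this.2.1, this.2.2.1, this.2.2.2, ih]
        · by_cases h4 : o == "-u"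
          · have : (o == "-p") = false ∧ (o == "-m") = false ∧ (o == "-j") = false := by
              rw [eq_of_beq h4]; exact ⟨rfl, rfl, rfl⟩
            simp [h1, h2, h3, h4, this.1, this.2.1, this.2.2, ih]
          · by_cases h5 : o == "-p"
            · have : (o == "-m") = false ∧ (o == "-j") = false := by
                rw [eq_of_beq h5]; exact ⟨rfl, rfl⟩
              simp [h1, h2, h3, h4, h5, this.1, this.2, ih]
            · by_cases h6 : o == "-m"
              · have : (o == "-j") = false := by rw [eq_of_beq h6]; rfl
                simp [h1, h2, h3, h4, h5, h6, this, ih]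
              · by_cases h7 : o == "-j" <;> simp [h1, h2, h3, h4, h5, h6, h7, ih]

-- ===== VERDICT (by name: the statement is the Claim_ definition above) =====
theorem parseSQLOpts_spec : Claim_equal_parseSQLOpts := by
  intro sqlOpts _
  unfold Spec_parseSQLOpts parseSQLOpts parseSQLOpts_alt
  rw [pvFold_eq_pick]
  simp [pvPick, Option.or_none]
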